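-- pv_equiv track=rewrite | github.com/chao98/Python | SPOJ/SPOJ12177.py | retCharline
-- ===== SOURCE A (Python) =====
-- def retChar(isStar):
--     charbuf = '*.'
--
--     if isStar:
--         return charbuf[0]
--     else:
--         return charbuf[1]
--
-- def retCharline(isTopOrBottom, n):
--     if isTopOrBottom:
--         return ''.join(['*' for i in range(n)])
--     else:
--         result = []
--         for i in range(n):
--             if i == 0 or i == n-1:
--                 result.append(retChar(True))
--             else:
--                 result.append(retChar(False))
--         return ''.join(result)
-- ===== SOURCE B (Python) =====
-- def retCharline(isTopOrBottom, n):
--     if isTopOrBottom or n < 2: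
--         return '*' * n
--     return '*' + '.' * (n - 2) + '*'
-- ===== Notes on version B (the rewrite author's own statement) =====
-- stated objective: faster
-- what changed: Replaced the per-index loops (list-comprehension join and an append loop with an i==0/i==n-1 branch per character) with direct closed-form string construction via bulk string repetition.
import Mathlib
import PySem

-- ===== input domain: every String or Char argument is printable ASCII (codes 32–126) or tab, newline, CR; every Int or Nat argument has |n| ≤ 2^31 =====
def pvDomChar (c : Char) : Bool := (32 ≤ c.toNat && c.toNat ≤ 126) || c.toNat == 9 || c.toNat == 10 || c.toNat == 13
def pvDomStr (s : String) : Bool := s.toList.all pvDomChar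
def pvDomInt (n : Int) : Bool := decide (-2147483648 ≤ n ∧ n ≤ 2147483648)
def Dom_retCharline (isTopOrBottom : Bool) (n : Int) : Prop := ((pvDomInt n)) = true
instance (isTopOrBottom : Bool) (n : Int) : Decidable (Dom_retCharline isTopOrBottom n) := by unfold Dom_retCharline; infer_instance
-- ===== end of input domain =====

-- B replaces A's per-index loops with closed-form string construction ('*'*n / '*'+'.'*(n-2)+'*'); objective: simpler.

-- ===== PORT A =====
-- charbuf[k] is always in range on "*."; the option is unwrapped to the singleton string Python returns.
def retChar (isStar : Bool) : String :=
  let charbuf : String := "*."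
  if isStar then
    String.ofList (((PySem.Str.pyGet? charbuf 0).map (fun c => [c])).getD [])
  else
    String.ofList (((PySem.Str.pyGet? charbuf 1).map (fun c => [c])).getD [])

def retCharline (isTopOrBottom : Bool) (n : Int) : String :=
  if isTopOrBottom then
    PySem.Str.join "" ((PySem.List.pyRange 0 n 1).map (fun _ => "*"))
  else
    let result := (PySem.List.pyRange 0 n 1).foldl
      (fun acc i => acc ++ [if i = 0 ∨ i = n - 1 then retChar true else retChar false]) []
    PySem.Str.join "" result

-- ===== PORT B =====
def retCharline_alt (isTopOrBottom : Bool) (n : Int) : String :=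
  if isTopOrBottom || n < 2 then
    String.ofList (PySem.List.pyRepeat ['*'] n)
  else
    String.ofList (['*'] ++ PySem.List.pyRepeat ['.'] (n - 2) ++ ['*'])

-- ===== PRECONDITION & SPEC =====
def Spec_retCharline (isTopOrBottom : Bool) (n : Int) (out : String) : Prop := out = retCharline_alt isTopOrBottom n
instance (isTopOrBottom : Bool) (n : Int) (out : String) : Decidable (Spec_retCharline isTopOrBottom n out) := by unfold Spec_retCharline; infer_instance

-- ===== CLAIM (what is proved, stated in full; the proofs are below) =====
def Claim_equal_retCharline : Prop := ∀ (isTopOrBottom : Bool) (n : Int), Dom_retCharline isTopOrBottom n → Spec_retCharline isTopOrBottom n (retCharline isTopOrBottom n)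

-- ===== LEMMAS AND PROOFS =====

-- the two singleton strings A's helper returns
theorem retChar_true : retChar true = "*" := by decide
theorem retChar_false : retChar false = "." := by decide

-- A's top/bottom branch, as a character list
theorem retCharline_top_toList (n : Int) :
    (PySem.Str.join "" ((PySem.List.pyRange 0 n 1).map (fun _ => "*"))).toList
      = List.replicate n.toNat '*' := by
  rw [PySem.Str.toList_join]
  have h1 : List.map String.toList ((PySem.List.pyRange 0 n 1).map (fun _ => ("*" : String)))
      = List.map (fun c => [c]) ((PySem.List.pyRange 0 n 1).map (fun _ => '*')) := by
    simp
  have h2 : ("" : String).toList = [] := rfl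
  rw [h1, h2, PySem.Chars.join_nil_singletons, List.map_const',
      PySem.List.length_pyRange_one]
  norm_num

-- A's middle branch for 2 ≤ n, as a character list
theorem retCharline_mid_toList (n : Int) (hn : 2 ≤ n) :
    (PySem.Str.join "" ((PySem.List.pyRange 0 n 1).foldl
        (fun acc i => acc ++ [if i = 0 ∨ i = n - 1 then retChar true else retChar false]) [])).toList
      = '*' :: (List.replicate (n - 2).toNat '.' ++ ['*']) := by
  rw [PySem.List.foldl_append_singleton_eq_map, List.nil_append, PySem.Str.toList_join]
  have h1 : List.map String.toList
      ((PySem.List.pyRange 0 n 1).map (fun i => if i = 0 ∨ i = n - 1 then retChar true else retChar false))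
      = List.map (fun c => [c])
          ((PySem.List.pyRange 0 n 1).map (fun i => if i = 0 ∨ i = n - 1 then '*' else '.')) := by
    simp only [List.map_map]
    refine List.map_congr_left (fun i _ => ?_)
    by_cases h : i = 0 ∨ i = n - 1 <;> simp [h, retChar_true, retChar_false]
  have h2 : ("" : String).toList = [] := rfl
  rw [h1, h2, PySem.Chars.join_nil_singletons]
  -- split the range: [0] ++ middle ++ [n-1]
  rw [PySem.List.pyRange_one_cons (by omega : (0:Int) < n)]
  have hsplit : PySem.List.pyRange (0+1) n 1
      = PySem.List.pyRange 1 (n-1) 1 ++ [n-1] := by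
    have h := PySem.List.pyRange_one_succ_right (a := 1) (b := n-1) (by omega : (1:Int) ≤ n - 1)
    have e : (n - 1) + 1 = n := by omega
    rw [e] at h
    rw [show (0:Int) + 1 = 1 from rfl]
    exact h
  rw [hsplit]
  simp only [List.map_cons, List.map_append, List.map_cons, List.map_nil]
  have hmid : (PySem.List.pyRange 1 (n-1) 1).map (fun i => if i = 0 ∨ i = n - 1 then '*' else '.')
      = List.replicate (n - 2).toNat '.' := by
    rw [List.map_congr_left (f := fun i => if i = 0 ∨ i = n - 1 then '*' else '.')
        (g := fun _ => '.') (fun i hi => ?_), List.map_const', PySem.List.length_pyRange_one]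
    · congr 1; omega
    · rw [PySem.List.mem_pyRange_one] at hi
      have : ¬ (i = 0 ∨ i = n - 1) := by omega
      simp [this]
  rw [hmid]
  simp

-- B's character lists
theorem alt_small_toList (n : Int) :
    (String.ofList (PySem.List.pyRepeat ['*'] n)).toList = List.replicate n.toNat '*' := by
  simp [PySem.List.pyRepeat_singleton]

theorem alt_mid_toList (n : Int) :
    (String.ofList (['*'] ++ PySem.List.pyRepeat ['.'] (n - 2) ++ ['*'])).toList
      = '*' :: (List.replicate (n - 2).toNat '.' ++ ['*']) := by
  simp [PySem.List.pyRepeat_singleton]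

-- ===== VERDICT (by name: the statement is the Claim_ definition above) =====
theorem retCharline_spec : Claim_equal_retCharline := by
  intro isTopOrBottom n _
  unfold Spec_retCharline
  apply String.toList_inj.mp
  cases isTopOrBottom with
  | true =>
      rw [show retCharline true n
            = PySem.Str.join "" ((PySem.List.pyRange 0 n 1).map (fun _ => "*")) from rfl,
          retCharline_top_toList]
      rw [show retCharline_alt true n = String.ofList (PySem.List.pyRepeat ['*'] n) from rfl,
          alt_small_toList]
  | false =>
      by_cases h2 : n < 2
      · -- n ≤ 1: A's loop runs 0 or 1 iterations, B returns '*' * n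
        rw [show retCharline_alt false n
              = String.ofList (PySem.List.pyRepeat ['*'] n) from (by simp [retCharline_alt, h2]),
            alt_small_toList]
        by_cases h0 : n ≤ 0
        · have hr : PySem.List.pyRange 0 n 1 = [] := PySem.List.pyRange_one_eq_nil (by omega)
          have hn0 : n.toNat = 0 := by omega
          simp [retCharline, hr, hn0, PySem.Str.toList_join, PySem.Chars.join, List.intercalate]
        · have h1 : n = 1 := by omega
          subst h1
          decide
      · rw [show retCharline false n
              = PySem.Str.join "" ((PySem.List.pyRange 0 n 1).foldl
                  (fun acc i => acc ++ [if i = 0 ∨ i = n - 1 then retChar true else retChar false]) [])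
            from rfl,
            retCharline_mid_toList n (by omega)]
        rw [show retCharline_alt false n
              = String.ofList (['*'] ++ PySem.List.pyRepeat ['.'] (n - 2) ++ ['*'])
            from (by simp [retCharline_alt, h2]),
            alt_mid_toList]
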